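-- pv_equiv track=rewrite | github.com/pypi-data/pypi-mirror-399 | packages/tjex/tjex-0.2.0-py3-none-any.whl/tjex/json_table.py | compare_prefix_len
-- ===== SOURCE A (Python) =====
-- def compare_prefix_len(base: str | None, a: str, b: str):
--     if base is None:
--         return True
--     for i, c in enumerate(base):
--         if i >= len(a) or a[i] != c:
--             return False
--         if i >= len(b) or b[i] != c:
--             return True
--     return True
-- ===== SOURCE B (Python) =====
-- def _cpl(x, y):
--     n = 0
--     m = min(len(x), len(y))
--     while n < m and x[n] == y[n]:
--         n += 1
--     return n
--
--
-- def compare_prefix_len(base, a, b):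
--     if base is None:
--         return True
--     cpl_a = _cpl(base, a)
--     cpl_b = _cpl(base, b)
--     return not (cpl_a < len(base) and cpl_a <= cpl_b)
-- ===== Notes on version B (the rewrite author's own statement) =====
-- stated objective: simpler
-- what changed: Replaced the interleaved per-index scan with early returns by two independent common-prefix-length measurements followed by one boolean comparison.
import Mathlib
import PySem

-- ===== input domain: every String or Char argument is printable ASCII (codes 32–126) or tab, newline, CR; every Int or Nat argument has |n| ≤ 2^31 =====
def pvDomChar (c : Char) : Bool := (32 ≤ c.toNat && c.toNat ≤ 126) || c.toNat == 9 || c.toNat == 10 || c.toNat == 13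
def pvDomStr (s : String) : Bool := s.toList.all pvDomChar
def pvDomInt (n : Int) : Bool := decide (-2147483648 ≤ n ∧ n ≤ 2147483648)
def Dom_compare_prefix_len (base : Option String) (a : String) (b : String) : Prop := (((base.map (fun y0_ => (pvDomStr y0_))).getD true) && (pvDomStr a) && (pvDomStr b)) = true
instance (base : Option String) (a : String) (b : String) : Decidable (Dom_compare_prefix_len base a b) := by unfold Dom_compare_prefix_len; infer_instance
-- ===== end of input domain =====

-- ===== PORT A =====
-- B recomputes A's result from two independent common-prefix lengths instead of one interleaved scan (simpler decomposition).
-- Loop over (i, c) of base; "i >= len(a) or a[i] != c" = remaining suffix of a empty or head ≠ c.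
def compareAux : List Char → List Char → List Char → Bool
  | [], _, _ => true
  | _ :: _, [], _ => false
  | c :: bs, x :: as_, ys =>
    if x ≠ c then false
    else match ys with
      | [] => true
      | y :: bs' => if y ≠ c then true else compareAux bs as_ bs'

def compare_prefix_len (base : Option String) (a : String) (b : String) : Bool :=
  match base with
  | none => true
  | some s => compareAux s.toList a.toList b.toList

-- ===== PORT B =====
def cplAux : List Char → List Char → Nat
  | x :: xs, y :: ys => if x = y then 1 + cplAux xs ys else 0
  | _, _ => 0

def compare_prefix_len_alt (base : Option String) (a : String) (b : String) : Bool :=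
  match base with
  | none => true
  | some s =>
    let ca := cplAux s.toList a.toList
    let cb := cplAux s.toList b.toList
    !(decide (ca < s.toList.length) && decide (ca ≤ cb))

-- ===== PRECONDITION & SPEC =====
def Spec_compare_prefix_len (base : Option String) (a : String) (b : String) (out : Bool) : Prop := out = compare_prefix_len_alt base a b
instance (base : Option String) (a : String) (b : String) (out : Bool) : Decidable (Spec_compare_prefix_len base a b out) := by unfold Spec_compare_prefix_len; infer_instance

-- ===== CLAIM (what is proved, stated in full; the proofs are below) =====
def Claim_equal_compare_prefix_len : Prop := ∀ (base : Option String) (a : String) (b : String), Dom_compare_prefix_len base a b → Spec_compare_prefix_len base a b (compare_prefix_len base a b)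

-- ===== LEMMAS AND PROOFS =====
theorem compareAux_eq (bs : List Char) : ∀ (as_ ys : List Char),
    compareAux bs as_ ys =
      !(decide (cplAux bs as_ < bs.length) && decide (cplAux bs as_ ≤ cplAux bs ys)) := by
  induction bs with
  | nil => intro as_ ys; simp [compareAux, cplAux]
  | cons c bs ih =>
    intro as_ ys
    cases as_ with
    | nil =>
      cases ys with
      | nil => simp [compareAux, cplAux]
      | cons y ys => by_cases h : y = c <;> simp [compareAux, cplAux, h]
    | cons x as_ =>
      by_cases hx : x = c
      · cases ys with
        | nil =>
          simp [compareAux, cplAux, hx]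
          try omega
        | cons y ys =>
          by_cases hy : y = c
          · simp [compareAux, cplAux, hx, hy, ih, Nat.add_comm 1, Nat.add_one_le_iff]
          · simp [compareAux, cplAux, hx, hy, Ne.symm hy]
            try omega
      · cases ys with
        | nil => simp [compareAux, cplAux, hx, Ne.symm hx]
        | cons y ys =>
          by_cases hy : y = c <;>
            simp [compareAux, cplAux, hx, hy, Ne.symm hx] <;> try omega

-- ===== VERDICT (by name: the statement is the Claim_ definition above) =====
theorem compare_prefix_len_spec : Claim_equal_compare_prefix_len := by
  intro base a b _
  unfold Spec_compare_prefix_len compare_prefix_len compare_prefix_len_alt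
  cases base with
  | none => rfl
  | some s => exact compareAux_eq s.toList a.toList b.toList
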